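-- pv_equiv track=rewrite | github.com/KuroiiRyuu/Personal | Python/Ocurrencias/pruebasTiempo.py | CrearNumeros
-- ===== SOURCE A (Python) =====
-- def CrearNumeros(numeros_primos):
--     numeros_creados = []
--     numeros_par = []
--     for i in range(len(numeros_primos)):
--         for j in range(len(numeros_primos)):
--             numero = numeros_primos[i] + numeros_primos[j]
--             numeros_creados.append(numero)
--             if numero % 2 == 0:
--                 numeros_par.append(numero)
--     return numeros_creados, numeros_par
-- ===== SOURCE B (Python) =====
-- def CrearNumeros(numeros_primos):
--     # Partition the inputs by parity once; a sum is even iff both addends share parity,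
--     # so each row's even sums come straight from the matching bucket -- no per-sum test.
--     pares = [b for b in numeros_primos if b % 2 == 0]
--     impares = [b for b in numeros_primos if b % 2 != 0]
--     numeros_creados = []
--     numeros_par = []
--     for a in numeros_primos:
--         numeros_creados.extend(a + b for b in numeros_primos)
--         bucket = pares if a % 2 == 0 else impares
--         numeros_par.extend(a + b for b in bucket)
--     return numeros_creados, numeros_par
-- ===== Notes on version B (the rewrite author's own statement) =====
-- stated objective: alternative
-- what changed: B partitions the input by parity once and builds the even-sum list directly from the matching parity bucket per row (a sum is even iff the addends share parity), eliminating A's per-sum modulo test inside the nested index loop.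
import Mathlib
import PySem

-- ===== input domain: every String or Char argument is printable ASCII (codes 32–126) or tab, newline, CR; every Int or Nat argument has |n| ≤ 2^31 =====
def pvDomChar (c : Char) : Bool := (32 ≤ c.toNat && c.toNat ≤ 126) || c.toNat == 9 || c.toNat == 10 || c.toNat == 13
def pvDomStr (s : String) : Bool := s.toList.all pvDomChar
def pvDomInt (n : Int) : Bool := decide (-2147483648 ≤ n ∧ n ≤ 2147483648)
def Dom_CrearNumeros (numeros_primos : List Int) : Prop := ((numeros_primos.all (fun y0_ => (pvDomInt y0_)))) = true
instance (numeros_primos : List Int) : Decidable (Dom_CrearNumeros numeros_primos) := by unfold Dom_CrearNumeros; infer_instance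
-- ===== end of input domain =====

-- B partitions the input by parity once and draws each row's even sums straight from the
-- matching bucket (a sum is even iff the addends share parity), instead of A's per-sum
-- modulo test inside the fused nested index loop; same O(n^2) cost, alternative algorithm.

-- ===== PORT A =====
def CrearNumeros (numeros_primos : List Int) : List Int × List Int :=
  (PySem.List.pyRange 0 numeros_primos.length 1).foldl (fun st i =>
    (PySem.List.pyRange 0 numeros_primos.length 1).foldl (fun st j =>
      (st.1 ++ [PySem.List.pyGetD numeros_primos i 0 + PySem.List.pyGetD numeros_primos j 0],
       if PySem.Int.mod (PySem.List.pyGetD numeros_primos i 0 + PySem.List.pyGetD numeros_primos j 0) 2 == 0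
       then st.2 ++ [PySem.List.pyGetD numeros_primos i 0 + PySem.List.pyGetD numeros_primos j 0] else st.2))
      st)
    ([], [])

-- ===== PORT B =====
def CrearNumeros_alt (numeros_primos : List Int) : List Int × List Int :=
  let pares := numeros_primos.filter (fun b => PySem.Int.mod b 2 == 0)
  let impares := numeros_primos.filter (fun b => !(PySem.Int.mod b 2 == 0))
  numeros_primos.foldl (fun st a =>
    (st.1 ++ numeros_primos.map (fun b => a + b),
     st.2 ++ (if PySem.Int.mod a 2 == 0 then pares else impares).map (fun b => a + b)))
    ([], [])

-- ===== PRECONDITION & SPEC =====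
def Spec_CrearNumeros (numeros_primos : List Int) (out : List Int × List Int) : Prop := out = CrearNumeros_alt numeros_primos
instance (numeros_primos : List Int) (out : List Int × List Int) : Decidable (Spec_CrearNumeros numeros_primos out) := by unfold Spec_CrearNumeros; infer_instance

-- ===== CLAIM (what is proved, stated in full; the proofs are below) =====
def Claim_equal_CrearNumeros : Prop := ∀ (numeros_primos : List Int), Dom_CrearNumeros numeros_primos → Spec_CrearNumeros numeros_primos (CrearNumeros numeros_primos)

-- ===== LEMMAS AND PROOFS =====

-- A's inner loop over element values appends the row and its evenness-filtered row
theorem pv_inner_fold (L : List Int) (f : Int → Int) (c p : List Int) :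
    L.foldl (fun st x =>
        (st.1 ++ [f x], if PySem.Int.mod (f x) 2 == 0 then st.2 ++ [f x] else st.2)) (c, p)
    = (c ++ L.map f, p ++ (L.map f).filter (fun n => PySem.Int.mod n 2 == 0)) := by
  induction L generalizing c p with
  | nil => simp
  | cons x t ih =>
    simp only [List.foldl_cons, List.map_cons, List.filter_cons]
    by_cases h : (PySem.Int.mod (f x) 2 == 0) = true
    · rw [if_pos h, if_pos h, ih]; simp
    · rw [if_neg h, if_neg h, ih]; simp

-- filtering the even sums of a row equals mapping the matching parity bucket
theorem pv_row_bucket (xs : List Int) (a : Int) :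
    (xs.map (fun b => a + b)).filter (fun n => PySem.Int.mod n 2 == 0)
    = (if PySem.Int.mod a 2 == 0
       then xs.filter (fun b => PySem.Int.mod b 2 == 0)
       else xs.filter (fun b => !(PySem.Int.mod b 2 == 0))).map (fun b => a + b) := by
  induction xs with
  | nil => simp
  | cons b t ih =>
    have h2 : (0 : Int) < 2 := by norm_num
    have hab : PySem.Int.mod (a + b) 2 = (a + b) % 2 := PySem.Int.mod_eq_emod_of_pos h2
    have hA : PySem.Int.mod a 2 = a % 2 := PySem.Int.mod_eq_emod_of_pos h2
    have hB : PySem.Int.mod b 2 = b % 2 := PySem.Int.mod_eq_emod_of_pos h2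
    by_cases ha : (PySem.Int.mod a 2 == 0) = true
    · rw [if_pos ha] at ih ⊢
      by_cases hb : (PySem.Int.mod b 2 == 0) = true
      · have hsum : (PySem.Int.mod (a + b) 2 == 0) = true := by
          simp only [beq_iff_eq] at *; omega
        simp only [List.map_cons, List.filter_cons, hsum, hb, if_true, ih]
      · rw [Bool.not_eq_true] at hb
        have hsum : (PySem.Int.mod (a + b) 2 == 0) = false := by
          simp only [beq_iff_eq, beq_eq_false_iff_ne, ne_eq] at *; omega
        simp only [List.map_cons, List.filter_cons, hsum, hb, if_false, ih,
          Bool.false_eq_true]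
    · rw [Bool.not_eq_true] at ha
      rw [if_neg (by simp only [ha]; decide)] at ih ⊢
      by_cases hb : (PySem.Int.mod b 2 == 0) = true
      · have hsum : (PySem.Int.mod (a + b) 2 == 0) = false := by
          simp only [beq_iff_eq, beq_eq_false_iff_ne, ne_eq] at *; omega
        simp only [List.map_cons, List.filter_cons, hsum, hb, Bool.not_true, if_false, ih,
          Bool.false_eq_true]
      · rw [Bool.not_eq_true] at hb
        have hsum : (PySem.Int.mod (a + b) 2 == 0) = true := by
          simp only [beq_iff_eq, beq_eq_false_iff_ne, ne_eq] at *; omega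
        simp only [List.map_cons, List.filter_cons, hsum, hb, Bool.not_false, if_true, ih]

theorem CrearNumeros_eq (xs : List Int) : CrearNumeros xs = CrearNumeros_alt xs := by
  unfold CrearNumeros CrearNumeros_alt
  rw [PySem.List.foldl_pyRange_zero_pyGetD' xs 0
    (fun st a =>
      (PySem.List.pyRange 0 xs.length 1).foldl (fun st j =>
        (st.1 ++ [a + PySem.List.pyGetD xs j 0],
         if PySem.Int.mod (a + PySem.List.pyGetD xs j 0) 2 == 0
         then st.2 ++ [a + PySem.List.pyGetD xs j 0] else st.2)) st) ([], [])]
  apply PySem.List.foldl_congr_mem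
  intro st a _
  rw [PySem.List.foldl_pyRange_zero_pyGetD' xs 0
    (fun st b =>
      (st.1 ++ [a + b], if PySem.Int.mod (a + b) 2 == 0 then st.2 ++ [a + b] else st.2)) st]
  rw [pv_inner_fold xs (fun b => a + b) st.1 st.2, pv_row_bucket xs a]

-- ===== VERDICT (by name: the statement is the Claim_ definition above) =====
theorem CrearNumeros_spec : Claim_equal_CrearNumeros := by
  intro xs _
  exact CrearNumeros_eq xs
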